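-- pv_equiv track=rewrite | github.com/IsThatYouCarl/Validating-credit-card-number | Validation.py | consecutive_numbers
-- ===== SOURCE A (Python) =====
-- def consecutive_numbers(card_number_list):
--     for j in range(len(card_number_list) - 3):
--         if card_number_list[j] == card_number_list[j+1] == card_number_list[j+2] == card_number_list[j+3]:
--             return False
--             break
--         else:
--             continue
--     return True
-- ===== SOURCE B (Python) =====
-- def consecutive_numbers(card_number_list):
--     # Single pass over run lengths: track the length of the current run of
--     # equal values; any run reaching 4 fails.
--     run = 0
--     prev = None
--     for x in card_number_list:
--         if run and x == prev:
--             run += 1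
--             if run == 4:
--                 return False
--         else:
--             prev = x
--             run = 1
--     return True
-- ===== Notes on version B (the rewrite author's own statement) =====
-- stated objective: alternative
-- what changed: Replaces the index-based sliding 4-element window with a single run-length scan that tracks the current run of equal values and fails when a run reaches length 4.
import Mathlib
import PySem

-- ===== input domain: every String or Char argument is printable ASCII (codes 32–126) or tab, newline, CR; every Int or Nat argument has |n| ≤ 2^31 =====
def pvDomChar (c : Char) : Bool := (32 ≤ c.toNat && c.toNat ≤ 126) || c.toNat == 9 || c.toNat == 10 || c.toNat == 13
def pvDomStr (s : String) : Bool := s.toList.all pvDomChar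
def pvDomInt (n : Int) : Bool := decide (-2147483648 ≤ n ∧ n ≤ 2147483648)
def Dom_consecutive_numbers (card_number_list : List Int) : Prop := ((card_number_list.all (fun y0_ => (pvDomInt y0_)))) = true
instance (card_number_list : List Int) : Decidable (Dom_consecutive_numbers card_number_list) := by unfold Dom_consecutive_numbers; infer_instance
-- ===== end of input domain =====

-- B replaces A's index-based sliding 4-window with a single run-length scan (same O(n) cost).


-- ===== PORT A =====
-- the 'for j in range(...)' loop with its early 'return False'
def consecutive_numbers_go (l : List Int) : List Int → Bool
  | [] => true
  | j :: js =>
      if PySem.List.pyGet? l j = PySem.List.pyGet? l (j + 1)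
          ∧ PySem.List.pyGet? l (j + 1) = PySem.List.pyGet? l (j + 2)
          ∧ PySem.List.pyGet? l (j + 2) = PySem.List.pyGet? l (j + 3)
      then false
      else consecutive_numbers_go l js

def consecutive_numbers (card_number_list : List Int) : Bool :=
  consecutive_numbers_go card_number_list
    (PySem.List.pyRange 0 ((card_number_list.length : Int) - 3) 1)

-- ===== PORT B =====
-- the 'for x in card_number_list' loop with state (prev, run) and early 'return False'
def consecutive_numbers_alt_go : List Int → Option Int → Int → Bool
  | [], _, _ => true
  | x :: xs, prev, run =>
      if run ≠ 0 ∧ some x = prev then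
        if run + 1 = 4 then false
        else consecutive_numbers_alt_go xs prev (run + 1)
      else consecutive_numbers_alt_go xs (some x) 1

def consecutive_numbers_alt (card_number_list : List Int) : Bool :=
  consecutive_numbers_alt_go card_number_list none 0

-- ===== PRECONDITION & SPEC =====
def Spec_consecutive_numbers (card_number_list : List Int) (out : Bool) : Prop := out = consecutive_numbers_alt card_number_list
instance (card_number_list : List Int) (out : Bool) : Decidable (Spec_consecutive_numbers card_number_list out) := by unfold Spec_consecutive_numbers; infer_instance

-- ===== CLAIM (what is proved, stated in full; the proofs are below) =====
def Claim_equal_consecutive_numbers : Prop := ∀ (card_number_list : List Int), Dom_consecutive_numbers card_number_list → Spec_consecutive_numbers card_number_list (consecutive_numbers card_number_list)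

-- ===== LEMMAS AND PROOFS =====

-- reference predicate: the list contains 4 equal consecutive elements
def has4 : List Int → Bool
  | a :: b :: c :: d :: t => decide (a = b ∧ b = c ∧ c = d) || has4 (b :: c :: d :: t)
  | _ => false

lemma has4_short (l : List Int) (h : l.length ≤ 3) : has4 l = false := by
  match l with
  | [] => rfl
  | [_] => rfl
  | [_, _] => rfl
  | [_, _, _] => rfl
  | _ :: _ :: _ :: _ :: _ => exfalso; simp at h; omega

lemma has4_cons_ne (y x : Int) (l : List Int) (h : y ≠ x) :
    has4 (y :: x :: l) = has4 (x :: l) := by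
  match l with
  | [] => rfl
  | [_] => rfl
  | a :: b :: t => simp [has4, h]

lemma has4_rep_ne (k : Nat) (hk1 : 1 ≤ k) (hk : k ≤ 3) (p x : Int) (xs : List Int)
    (h : x ≠ p) : has4 (List.replicate k p ++ x :: xs) = has4 (x :: xs) := by
  have hne : p ≠ x := fun e => h e.symm
  interval_cases k
  · simpa using has4_cons_ne p x xs hne
  · have h1 := has4_cons_ne p x xs hne
    match xs with
    | [] => rfl
    | y :: t => simp [has4, hne, h1]
  · have h1 := has4_cons_ne p x xs hne
    match xs with
    | [] => simp [has4, List.replicate, hne]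
    | [y] => simp [has4, List.replicate, hne]
    | y :: z :: t => simp [has4, List.replicate, hne]

-- B's loop computes ¬has4 of the current run plus the rest of the list
lemma altgo_eq (xs : List Int) : ∀ (p : Int) (k : Nat), 1 ≤ k → k ≤ 3 →
    consecutive_numbers_alt_go xs (some p) (k : Int) = !has4 (List.replicate k p ++ xs) := by
  induction xs with
  | nil =>
    intro p k h1 h3
    rw [consecutive_numbers_alt_go, has4_short _ (by simpa using h3)]
    rfl
  | cons x xs ih =>
    intro p k h1 h3
    rw [consecutive_numbers_alt_go]
    by_cases hxp : x = p
    · subst hxp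
      have hk0 : ((k : Int)) ≠ 0 := by omega
      rw [if_pos ⟨hk0, rfl⟩]
      by_cases h4 : (k : Int) + 1 = 4
      · have hk3 : k = 3 := by omega
        subst hk3
        rw [if_pos h4]
        simp [has4, List.replicate]
      · rw [if_neg h4]
        have hrec := ih x (k + 1) (by omega) (by omega)
        push_cast at hrec
        rw [hrec]
        congr 2
        rw [List.replicate_succ']
        simp
    · have hc : ¬ ((k : Int) ≠ 0 ∧ some x = some p) := fun hh => hxp (Option.some.inj hh.2)
      rw [if_neg hc]
      have hrec := ih x 1 le_rfl (by omega)
      push_cast at hrec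
      rw [hrec, has4_rep_ne k h1 h3 p x xs hxp]
      simp

lemma alt_eq_has4 (l : List Int) : consecutive_numbers_alt l = !has4 l := by
  match l with
  | [] => rfl
  | x :: xs =>
    rw [consecutive_numbers_alt, consecutive_numbers_alt_go, if_neg (by simp)]
    have hrec := altgo_eq xs x 1 le_rfl (by omega)
    push_cast at hrec
    rw [hrec]
    simp

-- shift lemma for A's loop: shifting all indices by one drops the head
lemma go_shift (a : Int) (l : List Int) (js : List Nat) :
    consecutive_numbers_go (a :: l) (js.map (fun (j : Nat) => (j : Int) + 1))
      = consecutive_numbers_go l (js.map (fun (j : Nat) => (j : Int))) := by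
  induction js with
  | nil => rfl
  | cons j js ih =>
    rw [show ((j :: js).map (fun (j : Nat) => (j : Int) + 1)) = ((j : Int) + 1) :: js.map (fun (j : Nat) => (j : Int) + 1) from rfl]
    rw [show ((j :: js).map (fun (j : Nat) => (j : Int))) = (j : Int) :: js.map (fun (j : Nat) => (j : Int)) from rfl]
    rw [consecutive_numbers_go, consecutive_numbers_go]
    have g0 : PySem.List.pyGet? (a :: l) ((j : Int) + 1) = PySem.List.pyGet? l (j : Int) :=
      PySem.List.pyGet?_cons_succ ..
    have g1 : PySem.List.pyGet? (a :: l) ((j : Int) + 1 + 1) = PySem.List.pyGet? l ((j : Int) + 1) := by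
      have h := PySem.List.pyGet?_cons_succ (x := a) (xs := l) (n := j + 1)
      push_cast at h
      convert h using 2
    have g2 : PySem.List.pyGet? (a :: l) ((j : Int) + 1 + 2) = PySem.List.pyGet? l ((j : Int) + 2) := by
      have h := PySem.List.pyGet?_cons_succ (x := a) (xs := l) (n := j + 2)
      push_cast at h
      convert h using 2
    have g3 : PySem.List.pyGet? (a :: l) ((j : Int) + 1 + 3) = PySem.List.pyGet? l ((j : Int) + 3) := by
      have h := PySem.List.pyGet?_cons_succ (x := a) (xs := l) (n := j + 3)
      push_cast at h
      convert h using 2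
    rw [g0, g1, g2, g3, ih]

lemma range_cast (m : Nat) :
    PySem.List.pyRange 0 (m : Int) 1 = (List.range m).map (fun (j : Nat) => (j : Int)) := by
  rw [PySem.List.pyRange_one]
  have h0 : ((m : Int) - 0).toNat = m := by omega
  rw [h0]
  apply List.map_congr_left
  intro j _
  simp

lemma a_eq_has4 : ∀ (n : Nat) (l : List Int), l.length ≤ n →
    consecutive_numbers l = !has4 l := by
  intro n
  induction n with
  | zero =>
    intro l hl
    have : l = [] := List.eq_nil_of_length_eq_zero (by omega)
    subst this
    rfl
  | succ n ih =>
    intro l hl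
    match l with
    | [] => rfl
    | [a] => rfl
    | [a, b] => rfl
    | [a, b, c] => rfl
    | a :: b :: c :: d :: t =>
      rw [consecutive_numbers]
      have hlen : ((a :: b :: c :: d :: t).length : Int) - 3 = ((t.length + 1 : Nat) : Int) := by
        simp only [List.length_cons]; push_cast; ring
      rw [hlen, range_cast, List.range_succ_eq_map, List.map_cons, List.map_map]
      rw [consecutive_numbers_go]
      have e0 : PySem.List.pyGet? (a :: b :: c :: d :: t) (0 : Int) = some a :=
        PySem.List.pyGet?_zero_cons ..
      have e1 : PySem.List.pyGet? (a :: b :: c :: d :: t) ((0 : Int) + 1) = some b := by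
        have h1 := PySem.List.pyGet?_cons_succ (x := a) (xs := b :: c :: d :: t) (n := 0)
        simpa using h1
      have e2 : PySem.List.pyGet? (a :: b :: c :: d :: t) ((0 : Int) + 2) = some c := by
        have h2 := PySem.List.pyGet?_cons_succ (x := b) (xs := c :: d :: t) (n := 0)
        have h1 := PySem.List.pyGet?_cons_succ (x := a) (xs := b :: c :: d :: t) (n := 1)
        rw [show ((1 : Nat) : Int) = ((0 : Nat) : Int) + 1 by norm_num] at h1
        rw [h2] at h1
        simpa using h1
      have e3 : PySem.List.pyGet? (a :: b :: c :: d :: t) ((0 : Int) + 3) = some d := by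
        have h3 := PySem.List.pyGet?_cons_succ (x := c) (xs := d :: t) (n := 0)
        have h2 := PySem.List.pyGet?_cons_succ (x := b) (xs := c :: d :: t) (n := 1)
        have h1 := PySem.List.pyGet?_cons_succ (x := a) (xs := b :: c :: d :: t) (n := 2)
        rw [show ((2 : Nat) : Int) = ((1 : Nat) : Int) + 1 by norm_num] at h1
        rw [h2] at h1
        rw [show ((1 : Nat) : Int) = ((0 : Nat) : Int) + 1 by norm_num] at h1
        rw [h3] at h1
        simpa using h1
      simp only [Nat.cast_zero]
      rw [e0, e1, e2, e3]
      have hmap : (List.range t.length).map ((fun (j : Nat) => (j : Int)) ∘ Nat.succ)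
          = (List.range t.length).map (fun (j : Nat) => (j : Int) + 1) := by
        apply List.map_congr_left
        intro j _
        simp [Function.comp]
      by_cases hw : some a = some b ∧ some b = some c ∧ some c = some d
      · rw [if_pos hw]
        obtain ⟨w1, w2, w3⟩ := hw
        have hab := Option.some.inj w1
        have hbc := Option.some.inj w2
        have hcd := Option.some.inj w3
        simp [has4, hab, hbc, hcd]
      · rw [if_neg hw]
        rw [hmap, go_shift]
        have htail : consecutive_numbers_go (b :: c :: d :: t)
            ((List.range t.length).map (fun (j : Nat) => (j : Int)))
            = consecutive_numbers (b :: c :: d :: t) := by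
          rw [consecutive_numbers, ← range_cast]
          congr 2
          simp only [List.length_cons]
          push_cast
          ring
        rw [htail, ih (b :: c :: d :: t) (by simp at hl ⊢; omega)]
        have hwf : ¬ (a = b ∧ b = c ∧ c = d) := by
          intro ⟨x1, x2, x3⟩
          exact hw ⟨by rw [x1], by rw [x2], by rw [x3]⟩
        simp [has4, hwf]

-- ===== VERDICT (by name: the statement is the Claim_ definition above) =====
theorem consecutive_numbers_spec : Claim_equal_consecutive_numbers := by
  intro l _
  unfold Spec_consecutive_numbers
  rw [alt_eq_has4, a_eq_has4 l.length l le_rfl]
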